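-- pv_equiv track=rewrite | github.com/SteveParadox/Anfinity | Server/app/api/semantic_search.py | _extract_highlight
-- ===== SOURCE A (Python) =====
-- def _extract_highlight(content: str, query: str) -> str:
--     """Extract highlighted snippet from content containing query terms.
--
--     Args:
--         content: Full content text
--         query: Query text to search for
--
--     Returns:
--         Highlighted snippet with ellipsis
--     """
--     if not content:
--         return ""
--
--     query_terms = [
--         term.lower()
--         for term in query.split()
--         if len(term) > 3
--     ]
--
--     if not query_terms:
--         return content[:200] + "..." if len(content) > 200 else content
--
--     content_lower = content.lower()
--     earliest_pos = len(content)
--     earliest_match = None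
--
--     for term in query_terms:
--         pos = content_lower.find(term)
--         if pos != -1 and pos < earliest_pos:
--             earliest_pos = pos
--             earliest_match = pos
--
--     if earliest_match is None:
--         return content[:200] + "..." if len(content) > 200 else content
--
--     start = max(0, earliest_match - 80)
--     end = min(len(content), earliest_match + 200)
--
--     highlight = ""
--     if start > 0:
--         highlight += "..."
--     highlight += content[start:end]
--     if end < len(content):
--         highlight += "..."
--
--     return highlight
-- ===== SOURCE B (Python) =====
-- def _extract_highlight(content: str, query: str) -> str:
--     """Extract highlighted snippet from content containing query terms."""
--     if not content:
--         return ""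
--
--     query_terms = [
--         term.lower()
--         for term in query.split()
--         if len(term) > 3
--     ]
--
--     content_lower = content.lower()
--
--     # Single left-to-right scan over positions: the first position at which
--     # any term starts is the earliest match over all terms.
--     earliest_match = None
--     if query_terms:
--         for i in range(len(content_lower)):
--             if any(content_lower.startswith(t, i) for t in query_terms):
--                 earliest_match = i
--                 break
--
--     if earliest_match is None:
--         return content[:200] + "..." if len(content) > 200 else content
--
--     start = max(0, earliest_match - 80)
--     end = min(len(content), earliest_match + 200)
--
--     highlight = ""
--     if start > 0:
--         highlight += "..."
--     highlight += content[start:end]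
--     if end < len(content):
--         highlight += "..."
--
--     return highlight
-- ===== Notes on version B (the rewrite author's own statement) =====
-- stated objective: alternative
-- what changed: Replaced the per-term find() loop that tracks the minimum position with a single left-to-right scan over content positions that stops at the first position where any term starts.
import Mathlib
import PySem

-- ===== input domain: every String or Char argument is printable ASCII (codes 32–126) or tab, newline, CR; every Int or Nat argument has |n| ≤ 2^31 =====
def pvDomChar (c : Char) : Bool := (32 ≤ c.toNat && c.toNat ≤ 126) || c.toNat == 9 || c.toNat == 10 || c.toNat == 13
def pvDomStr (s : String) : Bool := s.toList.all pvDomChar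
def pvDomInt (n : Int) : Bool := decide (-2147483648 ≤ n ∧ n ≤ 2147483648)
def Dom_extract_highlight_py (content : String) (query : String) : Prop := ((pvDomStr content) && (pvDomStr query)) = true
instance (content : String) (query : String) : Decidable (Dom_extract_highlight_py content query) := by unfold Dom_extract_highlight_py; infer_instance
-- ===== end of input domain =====

-- B replaces A's per-term find() loop (minimum of first occurrences) with one
-- left-to-right scan over content positions stopping at the first position where
-- any term starts; same result, alternative algorithm.

-- ===== PORT A =====
def extract_highlight_py (content : String) (query : String) : String :=
  if content = "" then ""
  else
    let query_terms := ((PySem.Str.split₀ query).filter (fun t => 3 < PySem.Str.len t)).map PySem.Str.lower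
    if query_terms = [] then
      (if 200 < PySem.Str.len content then PySem.Str.slice content none (some 200) ++ "..." else content)
    else
      let content_lower := PySem.Str.lower content
      let st := query_terms.foldl
        (fun (s : Int × Option Int) term =>
          let pos := PySem.Str.find content_lower term
          if pos ≠ -1 ∧ pos < s.1 then (pos, some pos) else s)
        (PySem.Str.len content, none)
      match st.2 with
      | none =>
        (if 200 < PySem.Str.len content then PySem.Str.slice content none (some 200) ++ "..." else content)
      | some m =>
        let start := max 0 (m - 80)
        let stop := min (PySem.Str.len content) (m + 200)
        let highlight : String := ""
        let highlight := if 0 < start then highlight ++ "..." else highlight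
        let highlight := highlight ++ PySem.Str.slice content (some start) (some stop)
        let highlight := if stop < (PySem.Str.len content) then highlight ++ "..." else highlight
        highlight

-- ===== PORT B =====
-- B's position scan: first index i with some term starting at i (i counts from `i`).
def pvScan (terms : List String) (s : List Char) (i : Nat) : Option Nat :=
  match s with
  | [] => none
  | _ :: rest =>
    if terms.any (fun t => PySem.Chars.startswith s t.toList) then some i
    else pvScan terms rest (i + 1)

def extract_highlight_py_alt (content : String) (query : String) : String :=
  if content = "" then ""
  else
    let query_terms := ((PySem.Str.split₀ query).filter (fun t => 3 < PySem.Str.len t)).map PySem.Str.lower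
    let content_lower := (PySem.Str.lower content).toList
    let earliest_match : Option Nat :=
      if query_terms = [] then none else pvScan query_terms content_lower 0
    match earliest_match with
    | none =>
      (if 200 < PySem.Str.len content then PySem.Str.slice content none (some 200) ++ "..." else content)
    | some i =>
      let start := max 0 ((i : Int) - 80)
      let stop := min (PySem.Str.len content) ((i : Int) + 200)
      ((if 0 < start then "" ++ "..." else "") ++ PySem.Str.slice content (some start) (some stop))
        ++ (if stop < (PySem.Str.len content) then "..." else "")

-- ===== PRECONDITION & SPEC =====
def Spec_extract_highlight_py (content : String) (query : String) (out : String) : Prop := out = extract_highlight_py_alt content query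
instance (content : String) (query : String) (out : String) : Decidable (Spec_extract_highlight_py content query out) := by unfold Spec_extract_highlight_py; infer_instance

-- ===== CLAIM (what is proved, stated in full; the proofs are below) =====
def Claim_equal_extract_highlight_py : Prop := ∀ (content : String) (query : String), Dom_extract_highlight_py content query → Spec_extract_highlight_py content query (extract_highlight_py content query)

-- ===== LEMMAS AND PROOFS =====

-- "some term starts at position j of cl"
def pvP (terms : List String) (cl : List Char) (j : Nat) : Prop :=
  ∃ t ∈ terms, t.toList <+: cl.drop j

lemma pvScan_none (terms : List String) (hne : ∀ t ∈ terms, t.toList ≠ []) :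
    ∀ (s : List Char) (i : Nat), pvScan terms s i = none → ∀ j, ¬ pvP terms s j := by
  intro s
  induction s with
  | nil =>
    intro i _ j ⟨t, ht, hp⟩
    rw [List.drop_nil] at hp
    exact hne t ht (List.prefix_nil.mp hp)
  | cons c rest ih =>
    intro i h j hp
    unfold pvScan at h
    split at h
    · exact absurd h (by simp)
    · rename_i hno
      match j with
      | 0 =>
        obtain ⟨t, ht, hpre⟩ := hp
        rw [List.drop_zero] at hpre
        simp only [List.any_eq_true, not_exists, not_and, Bool.not_eq_true] at hno
        have := hno t ht
        rw [Bool.eq_false_iff, Ne, PySem.Chars.startswith_iff] at this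
        exact this hpre
      | j + 1 =>
        exact ih (i + 1) h j (by simpa [pvP] using hp)

lemma pvScan_some (terms : List String) :
    ∀ (s : List Char) (i r : Nat), pvScan terms s i = some r →
      ∃ j, r = i + j ∧ pvP terms s j ∧ ∀ k < j, ¬ pvP terms s k := by
  intro s
  induction s with
  | nil => intro i r h; simp [pvScan] at h
  | cons c rest ih =>
    intro i r h
    unfold pvScan at h
    split at h
    · rename_i hyes
      have hri : r = i := by injection h; omega
      refine ⟨0, by omega, ?_, by omega⟩
      obtain ⟨t, ht, hs⟩ := List.any_eq_true.mp hyes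
      refine ⟨t, ht, ?_⟩
      rw [List.drop_zero]
      exact (PySem.Chars.startswith_iff _ _).mp hs
    · rename_i hno
      obtain ⟨j, hr, hPj, hmin⟩ := ih (i + 1) r h
      refine ⟨j + 1, by omega, by simpa [pvP] using hPj, ?_⟩
      intro k hk
      match k with
      | 0 =>
        rintro ⟨t, ht, hpre⟩
        rw [List.drop_zero] at hpre
        simp only [List.any_eq_true, not_exists, not_and, Bool.not_eq_true] at hno
        have := hno t ht
        rw [Bool.eq_false_iff, Ne, PySem.Chars.startswith_iff] at this
        exact this hpre
      | k + 1 =>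
        have := hmin k (by omega)
        intro hp; exact this (by simpa [pvP] using hp)

-- invariant for A's fold over the terms
def pvInv (cl : List Char) (ts : List String) (s : Int × Option Int) : Prop :=
  (s.2 = none ∧ s.1 = (cl.length : Int) ∧ ∀ t ∈ ts, ¬ t.toList <:+: cl) ∨
  (∃ p : Nat, s.2 = some (p : Int) ∧ s.1 = (p : Int) ∧ p < cl.length ∧
    pvP ts cl p ∧ ∀ k < p, ¬ pvP ts cl k)

lemma pvP_append {terms₁ terms₂ : List String} {cl : List Char} {j : Nat} :
    pvP (terms₁ ++ terms₂) cl j ↔ pvP terms₁ cl j ∨ pvP terms₂ cl j := by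
  simp [pvP]; constructor
  · rintro ⟨t, ht | ht, hp⟩
    · exact Or.inl ⟨t, ht, hp⟩
    · exact Or.inr ⟨t, ht, hp⟩
  · rintro (⟨t, ht, hp⟩ | ⟨t, ht, hp⟩)
    · exact ⟨t, Or.inl ht, hp⟩
    · exact ⟨t, Or.inr ht, hp⟩

lemma pvFold_inv (cl : List Char) (terms : List String)
    (hne : ∀ t ∈ terms, t.toList ≠ []) :
    ∀ (ts₀ : List String) (s : Int × Option Int), pvInv cl ts₀ s →
      pvInv cl (ts₀ ++ terms)
        (terms.foldl (fun (s : Int × Option Int) term =>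
          if PySem.Chars.find cl term.toList ≠ -1 ∧ PySem.Chars.find cl term.toList < s.1
          then (PySem.Chars.find cl term.toList, some (PySem.Chars.find cl term.toList)) else s) s) := by
  induction terms with
  | nil => intro ts₀ s h; simpa using h
  | cons t rest ih =>
    intro ts₀ s h
    have hne' : ∀ u ∈ rest, u.toList ≠ [] := fun u hu => hne u (by simp [hu])
    have htne : t.toList ≠ [] := hne t (by simp)
    have hstep : pvInv cl (ts₀ ++ [t])
        (if PySem.Chars.find cl t.toList ≠ -1 ∧ PySem.Chars.find cl t.toList < s.1
         then (PySem.Chars.find cl t.toList, some (PySem.Chars.find cl t.toList)) else s) := by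
      set pos := PySem.Chars.find cl t.toList with hposdef
      by_cases hocc : t.toList <:+: cl
      · -- t occurs; pos = first occurrence index
        have hpos0 : 0 ≤ pos := (PySem.Chars.find_nonneg_iff cl t.toList).mpr hocc
        have hspec := PySem.Chars.find_spec (s := cl) (sub := t.toList) hpos0
        have hposlen : pos.toNat < cl.length := by
          rcases Nat.lt_or_ge pos.toNat cl.length with h' | h'
          · exact h'
          · exfalso
            have : cl.drop pos.toNat = [] := List.drop_eq_nil_of_le h'
            rw [this] at hspec
            exact htne (List.prefix_nil.mp hspec.1)
        have hposne : pos ≠ -1 := by omega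
        rcases h with ⟨h2, h1, hnocc⟩ | ⟨p, h2, h1, hplen, hPp, hmin⟩
        · -- state was (len, none): pos < len so we take it
          have : pos < s.1 := by rw [h1]; omega
          rw [if_pos (show ¬pos = -1 ∧ pos < s.1 from ⟨hposne, this⟩)]
          refine Or.inr ⟨pos.toNat, by simp [Int.toNat_of_nonneg hpos0], by simp [Int.toNat_of_nonneg hpos0], hposlen, ?_, ?_⟩
          · exact pvP_append.mpr (Or.inr ⟨t, by simp, hspec.1⟩)
          · intro k hk hPk
            rcases pvP_append.mp hPk with hl | hr
            · obtain ⟨u, hu, hup⟩ := hl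
              exact hnocc u hu ((PySem.Chars.isIn_iff_infix u.toList cl).mp
                ((PySem.Chars.exists_prefix_drop_iff_isIn u.toList cl).mp ⟨k, hup⟩))
            · obtain ⟨u, hu, hup⟩ := hr
              simp at hu; subst hu
              exact hspec.2 k hk hup
        · -- state was (p, some p)
          by_cases hlt : pos < s.1
          · rw [if_pos (show ¬pos = -1 ∧ pos < s.1 from ⟨hposne, hlt⟩)]
            have hposp : pos.toNat < p := by rw [h1] at hlt; omega
            refine Or.inr ⟨pos.toNat, by simp [Int.toNat_of_nonneg hpos0], by simp [Int.toNat_of_nonneg hpos0], hposlen, ?_, ?_⟩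
            · exact pvP_append.mpr (Or.inr ⟨t, by simp, hspec.1⟩)
            · intro k hk hPk
              rcases pvP_append.mp hPk with hl | hr
              · exact hmin k (by omega) hl
              · obtain ⟨u, hu, hup⟩ := hr
                simp at hu; subst hu
                exact hspec.2 k hk hup
          · rw [if_neg (show ¬(¬pos = -1 ∧ pos < s.1) by tauto)]
            refine Or.inr ⟨p, h2, h1, hplen, pvP_append.mpr (Or.inl hPp), ?_⟩
            intro k hk hPk
            rcases pvP_append.mp hPk with hl | hr
            · exact hmin k hk hl
            · obtain ⟨u, hu, hup⟩ := hr
              simp at hu; subst hu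
              have : pos.toNat ≤ k := by
                by_contra hc
                exact hspec.2 k (by omega) hup
              rw [h1] at hlt; omega
      · -- t does not occur: pos = -1, state unchanged
        have hposneg : pos = -1 := (PySem.Chars.find_eq_neg_one_iff cl t.toList).mpr hocc
        have hnoP : ∀ k, ¬ (t.toList <+: cl.drop k) := by
          intro k hk
          exact hocc ((PySem.Chars.isIn_iff_infix t.toList cl).mp
            ((PySem.Chars.exists_prefix_drop_iff_isIn t.toList cl).mp ⟨k, hk⟩))
        rw [if_neg (show ¬(¬pos = -1 ∧ pos < s.1) by rw [hposneg]; simp)]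
        rcases h with ⟨h2, h1, hnocc⟩ | ⟨p, h2, h1, hplen, hPp, hmin⟩
        · refine Or.inl ⟨h2, h1, ?_⟩
          intro u hu
          rcases List.mem_append.mp hu with hl | hr
          · exact hnocc u hl
          · simp at hr; subst hr; exact hocc
        · refine Or.inr ⟨p, h2, h1, hplen, pvP_append.mpr (Or.inl hPp), ?_⟩
          intro k hk hPk
          rcases pvP_append.mp hPk with hl | hr
          · exact hmin k hk hl
          · obtain ⟨u, hu, hup⟩ := hr
            simp at hu; subst hu
            exact hnoP k hup
    simpa [List.foldl_cons, List.append_assoc] using ih hne' (ts₀ ++ [t]) _ hstep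

-- terms produced by the comprehension are nonempty
lemma pvTerms_ne (query : String) :
    ∀ t ∈ ((PySem.Str.split₀ query).filter (fun t => 3 < PySem.Str.len t)).map PySem.Str.lower,
      t.toList ≠ [] := by
  intro t ht
  obtain ⟨u, hu, hut⟩ := List.mem_map.mp ht
  have hlen : 3 < u.toList.length := by
    have := (List.mem_filter.mp hu).2
    simpa [PySem.Str.len] using of_decide_eq_true this
  subst hut
  have : (PySem.Str.lower u).toList = PySem.Chars.lower u.toList := PySem.Str.toList_lower u
  rw [this]
  simp [PySem.Chars.lower]
  intro h
  rw [h] at hlen; simp at hlen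

-- the two earliest-match computations agree
lemma pvMatch_eq (cl : List Char) (terms : List String)
    (hne : ∀ t ∈ terms, t.toList ≠ []) (hterms : terms ≠ []) :
    (terms.foldl (fun (s : Int × Option Int) term =>
        if PySem.Chars.find cl term.toList ≠ -1 ∧ PySem.Chars.find cl term.toList < s.1
        then (PySem.Chars.find cl term.toList, some (PySem.Chars.find cl term.toList)) else s)
      ((cl.length : Int), none)).2
    = (pvScan terms cl 0).map (fun (n : Nat) => (n : Int)) := by
  have hinv := pvFold_inv cl terms hne [] ((cl.length : Int), none) (Or.inl ⟨rfl, rfl, by simp⟩)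
  simp only [List.nil_append] at hinv
  cases hscan : pvScan terms cl 0 with
  | none =>
    have hnoP := pvScan_none terms hne cl 0 hscan
    rcases hinv with ⟨h2, _, _⟩ | ⟨p, h2, _, _, hPp, _⟩
    · simp [h2]
    · exact absurd hPp (hnoP p)
  | some r =>
    obtain ⟨j, hr, hPj, hminj⟩ := pvScan_some terms cl 0 r hscan
    have hjr : j = r := by omega
    subst hjr
    rcases hinv with ⟨h2, _, hnocc⟩ | ⟨p, h2, _, _, hPp, hminp⟩
    · exfalso
      obtain ⟨t, ht, hp⟩ := hPj
      exact hnocc t ht ((PySem.Chars.isIn_iff_infix t.toList cl).mp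
        ((PySem.Chars.exists_prefix_drop_iff_isIn t.toList cl).mp ⟨j, hp⟩))
    · have : p = j := by
        rcases Nat.lt_trichotomy p j with h | h | h
        · exact absurd hPp (hminj p h)
        · exact h
        · exact absurd hPj (hminp j h)
      subst this
      simp [h2]

-- ===== VERDICT (by name: the statement is the Claim_ definition above) =====
theorem extract_highlight_py_spec : Claim_equal_extract_highlight_py := by
  intro content query _
  unfold Spec_extract_highlight_py extract_highlight_py extract_highlight_py_alt
  by_cases hc : content = ""
  · simp [hc]
  · rw [if_neg hc, if_neg hc]
    set terms := ((PySem.Str.split₀ query).filter (fun t => 3 < PySem.Str.len t)).map PySem.Str.lower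
    by_cases ht : terms = []
    · simp [ht]
    · have hfind : ∀ term, PySem.Str.find (PySem.Str.lower content) term
          = PySem.Chars.find (PySem.Str.lower content).toList term.toList := by
        intro term; simp [PySem.Str.find]
      have hkey := pvMatch_eq (PySem.Str.lower content).toList terms (pvTerms_ne query) ht
      have hlen : (((PySem.Str.lower content).toList.length : Nat) : Int) = PySem.Str.len content := by
        simp [PySem.Str.toList_lower, PySem.Chars.lower, PySem.Str.len]
      rw [hlen] at hkey
      simp only [if_neg ht, hfind]
      rw [hkey]
      cases pvScan terms (PySem.Str.lower content).toList 0 with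
      | none => simp
      | some i => simp; split <;> simp
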